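-- pv_equiv track=rewrite | github.com/quadrokzn-cmd/ConfiguratorPC2 | portal/services/auctions/catalog/enrichment/merge.py | merge_attrs
-- ===== SOURCE A (Python) =====
-- NA = "n/a"
--
-- def merge_attrs(existing: dict, incoming: dict) -> dict:
--     """Per-key merge атрибутов.
--
--     Правила (см. модульный docstring):
--     - `incoming[k] == NA`: не затирает не-NA в `existing`;
--        если ключа в `existing` нет — записывает `NA`.
--     - `incoming[k] != NA`: всегда обновляет `existing[k]`.
--
--     Возвращает новый dict; вход не модифицируется.
--     """
--     new_attrs = dict(existing)
--     for key, incoming_value in incoming.items():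
--         existing_value = new_attrs.get(key)
--         if incoming_value == NA:
--             if existing_value is None:
--                 new_attrs[key] = NA
--             # иначе: не трогаем не-NA-значение (n/a-protection)
--             continue
--         new_attrs[key] = incoming_value
--     return new_attrs
-- ===== SOURCE B (Python) =====
-- NA = "n/a"
--
-- def merge_attrs(existing: dict, incoming: dict) -> dict:
--     """Staged construction: build an index of the effective (non-NA)
--     overrides once, map it across existing, and concatenate incoming's
--     novel entries; the final dict is assembled from one list."""
--     override = {k: v for k, v in incoming.items() if v != NA}
--     head = [(k, override.get(k, ev)) for k, ev in existing.items()]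
--     tail = [(k, iv) for k, iv in incoming.items() if k not in existing]
--     return dict(head + tail)
-- ===== Notes on version B (the rewrite author's own statement) =====
-- stated objective: alternative
-- what changed: B is a staged pipeline: it first builds an index of the effective (non-NA) incoming overrides, then maps that index over existing's entries, separately collects incoming's novel entries verbatim, and assembles the result dict from the concatenation of the two lists — instead of A's copy-existing-then-conditionally-patch-in-place loop over incoming.
import Mathlib
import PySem

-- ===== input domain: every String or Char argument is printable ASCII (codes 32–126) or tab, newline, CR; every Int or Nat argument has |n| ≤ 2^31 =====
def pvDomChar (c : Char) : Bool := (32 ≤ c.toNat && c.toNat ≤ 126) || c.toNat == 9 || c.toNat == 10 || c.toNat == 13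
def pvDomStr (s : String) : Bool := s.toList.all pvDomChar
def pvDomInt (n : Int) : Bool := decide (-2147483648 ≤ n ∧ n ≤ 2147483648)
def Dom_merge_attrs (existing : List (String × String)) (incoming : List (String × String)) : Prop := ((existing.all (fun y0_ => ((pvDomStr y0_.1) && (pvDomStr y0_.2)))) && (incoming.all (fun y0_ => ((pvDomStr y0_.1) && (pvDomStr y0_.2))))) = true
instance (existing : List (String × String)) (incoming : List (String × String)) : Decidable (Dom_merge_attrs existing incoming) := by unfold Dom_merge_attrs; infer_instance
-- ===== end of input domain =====

-- B assembles the result from an override index, a mapped existing list and incoming's novel entries, instead of A's copy-then-patch loop (objective: alternative decomposition).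

-- ===== PORT A =====
def pvNA : String := "n/a"

-- one iteration of A's 'for key, incoming_value in incoming.items()' body
def pvMergeStep (new_attrs : PySem.Dict String String) (p : String × String) : PySem.Dict String String :=
  let existing_value := new_attrs.get? p.1
  if p.2 == pvNA then
    (if existing_value == none then new_attrs.insert p.1 pvNA else new_attrs)
  else new_attrs.insert p.1 p.2

def merge_attrs (existing : List (String × String)) (incoming : List (String × String)) : List (String × String) :=
  let new_attrs : PySem.Dict String String := PySem.Dict.ofList existing   -- dict(existing)
  ((PySem.Dict.ofList incoming).items.foldl pvMergeStep new_attrs).items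

-- ===== PORT B =====
def merge_attrs_alt (existing : List (String × String)) (incoming : List (String × String)) : List (String × String) :=
  let E : PySem.Dict String String := PySem.Dict.ofList existing
  let I : PySem.Dict String String := PySem.Dict.ofList incoming
  -- override = {k: v for k, v in incoming.items() if v != NA}
  let override : PySem.Dict String String := PySem.Dict.ofList (I.items.filter (fun p => p.2 != pvNA))
  -- head = [(k, override.get(k, ev)) for k, ev in existing.items()]
  let head := E.items.map (fun p => (p.1, override.getD p.1 p.2))
  -- tail = [(k, iv) for k, iv in incoming.items() if k not in existing]
  let tail := I.items.filter (fun p => !(E.contains p.1))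
  (PySem.Dict.ofList (head ++ tail)).items

-- ===== PRECONDITION & SPEC =====
def Spec_merge_attrs (existing : List (String × String)) (incoming : List (String × String)) (out : List (String × String)) : Prop := out = merge_attrs_alt existing incoming
instance (existing : List (String × String)) (incoming : List (String × String)) (out : List (String × String)) : Decidable (Spec_merge_attrs existing incoming out) := by unfold Spec_merge_attrs; infer_instance

-- ===== CLAIM =====
def Claim_equal_merge_attrs : Prop := ∀ (existing : List (String × String)) (incoming : List (String × String)), Dom_merge_attrs existing incoming → Spec_merge_attrs existing incoming (merge_attrs existing incoming)

-- ===== LEMMAS AND PROOFS =====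

-- value assigned to key k (proof-side characterisation, used for both sides)
def pvPick (E I : PySem.Dict String String) (k : String) : String :=
  match I.get? k with
  | some v => if v == pvNA then E.getD k pvNA else v
  | none => E.getD k pvNA

theorem pv_items_ofList (l : List (String × String)) (h : (l.map Prod.fst).Nodup) :
    (PySem.Dict.ofList l).items = l := by
  have := PySem.Dict.items_foldl_insert_fresh (l := l) (k := Prod.fst) (v := Prod.snd)
    (d := (PySem.Dict.empty : PySem.Dict String String)) (by intro a _; rfl) h
  simpa [PySem.Dict.ofList, PySem.Dict.update] using this

theorem pv_step_eq (E : PySem.Dict String String) (k v : String) :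
    pvMergeStep E (k, v) = if E.contains k = true ∧ v = pvNA then E else E.insert k v := by
  unfold pvMergeStep
  by_cases hv : v = pvNA
  · subst hv
    by_cases hc : E.contains k = true
    · have hg : ¬ E.get? k = none := by
        rw [PySem.Dict.get?_eq_none_iff_contains]; simp [hc]
      simp [hc, hg]
    · have hg : E.get? k = none := by
        rw [PySem.Dict.get?_eq_none_iff_contains]; simpa using hc
      simp [hc, hg]
  · simp [hv]

theorem pv_pick_step (E : PySem.Dict String String) (k v : String)
    (rest : List (String × String)) (hk : k ∉ rest.map Prod.fst) (j : String) :
    pvPick (pvMergeStep E (k, v)) (PySem.Dict.mk rest) j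
      = pvPick E (PySem.Dict.mk ((k, v) :: rest)) j := by
  rw [pv_step_eq]
  by_cases hj : j = k
  · subst hj
    have hnone : (PySem.Dict.mk rest).get? j = none := by
      simp [PySem.Dict.get?_eq_none_iff_not_mem_keys, PySem.Dict.keys, hk]
    by_cases hc : E.contains j = true
    · by_cases hv : v = pvNA
      · simp [pvPick, hc, hv, hnone, PySem.Dict.get?_mk_cons]
      · simp [pvPick, hc, hv, hnone, PySem.Dict.get?_mk_cons, PySem.Dict.getD_insert_self]
    · have hg : E.getD j pvNA = pvNA := by
        apply PySem.Dict.getD_of_not_contains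
        simpa using hc
      by_cases hv : v = pvNA
      · simp [pvPick, hc, hv, hnone, PySem.Dict.get?_mk_cons, PySem.Dict.getD_insert_self, hg]
      · simp [pvPick, hc, hv, hnone, PySem.Dict.get?_mk_cons, PySem.Dict.getD_insert_self]
  · have hcons : (PySem.Dict.mk ((k, v) :: rest)).get? j = (PySem.Dict.mk rest).get? j := by
      rw [PySem.Dict.get?_mk_cons]; simp [Ne.symm hj]
    split_ifs with h
    · simp [pvPick, hcons]
    · simp [pvPick, hcons, PySem.Dict.getD_insert, hj]

theorem pv_fold_eq (l : List (String × String)) (E : PySem.Dict String String)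
    (hl : (l.map Prod.fst).Nodup) (hE : E.keys.Nodup) :
    (l.foldl pvMergeStep E).items
      = (E.keys ++ (l.map Prod.fst).filter (fun k => !(E.contains k))).map
          (fun k => (k, pvPick E (PySem.Dict.mk l) k)) := by
  induction l generalizing E with
  | nil =>
    simp only [List.foldl_nil, List.map_nil, List.filter_nil, List.append_nil]
    rw [PySem.Dict.items_eq_map_keys E hE pvNA]
    rfl
  | cons p rest IH =>
    obtain ⟨k, v⟩ := p
    simp only [List.map_cons, List.nodup_cons] at hl
    obtain ⟨hk, hrest⟩ := hl
    have hE' : (pvMergeStep E (k, v)).keys.Nodup := by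
      rw [pv_step_eq]
      split_ifs
      · exact hE
      · exact PySem.Dict.nodup_keys_insert _ _ _ hE
    rw [List.foldl_cons, IH (pvMergeStep E (k, v)) hrest hE']
    have hfun : (fun j => (j, pvPick (pvMergeStep E (k, v)) (PySem.Dict.mk rest) j))
        = (fun j => (j, pvPick E (PySem.Dict.mk ((k, v) :: rest)) j)) :=
      funext fun j => by rw [pv_pick_step E k v rest hk j]
    rw [hfun]
    congr 1
    rw [pv_step_eq]
    by_cases hc : E.contains k = true
    · by_cases hv : v = pvNA
      · simp [hc, hv]
      · have hkeys : (E.insert k v).keys = E.keys := by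
          apply PySem.Dict.keys_insert_of_contains
          exact hc
        have hcont : ∀ j, ((E.insert k v).contains j) = E.contains j := by
          intro j
          rw [PySem.Dict.contains_insert]
          by_cases hj : j = k
          · subst hj; simp [hc]
          · simp [hj]
        simp [hc, hv, hkeys, hcont]
    · have hcF : E.contains k = false := by simpa using hc
      have hif : (if E.contains k = true ∧ v = pvNA then E else E.insert k v) = E.insert k v := by
        simp [hcF]
      rw [hif]
      have hkeys : (E.insert k v).keys = E.keys ++ [k] := by
        apply PySem.Dict.keys_insert_of_not_contains
        exact hcF
      have hfilt : (List.map Prod.fst rest).filter (fun j => !((E.insert k v).contains j))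
          = (List.map Prod.fst rest).filter (fun j => !(E.contains j)) := by
        apply List.filter_congr
        intro j hj
        have hjk : j ≠ k := fun h => hk (h ▸ hj)
        rw [PySem.Dict.contains_insert]
        simp [hjk]
      rw [hkeys, hfilt]
      simp [hcF]

-- the override index looks up exactly pvPick's non-NA branch
theorem pv_override_getD (I : PySem.Dict String String) (hI : I.keys.Nodup) (k d : String) :
    (PySem.Dict.ofList (I.items.filter (fun p => p.2 != pvNA))).getD k d
      = match I.get? k with
        | some v => if v == pvNA then d else v
        | none => d := by
  have hfkeys : ((I.items.filter (fun p => p.2 != pvNA)).map Prod.fst).Nodup := by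
    exact ((List.filter_sublist).map Prod.fst).nodup hI
  have hitems : (PySem.Dict.ofList (I.items.filter (fun p => p.2 != pvNA))).items
      = I.items.filter (fun p => p.2 != pvNA) := pv_items_ofList _ hfkeys
  cases hg : I.get? k with
  | some v =>
    by_cases hv : v = pvNA
    · have hnone : (PySem.Dict.ofList (I.items.filter (fun p => p.2 != pvNA))).get? k = none := by
        rw [PySem.Dict.get?_eq_none_iff_not_mem_keys]
        intro hmem
        simp only [PySem.Dict.keys, hitems, List.mem_map] at hmem
        obtain ⟨p, hp, hpk⟩ := hmem
        have hpI : p ∈ I.items := (List.mem_filter.mp hp).1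
        have hpv : p.2 ≠ pvNA := by simpa using (List.mem_filter.mp hp).2
        have : I.get? p.1 = some p.2 := PySem.Dict.get?_of_mem_items I hpI hI
        rw [hpk, hg] at this
        exact hpv (by injection this with h; rw [← h, hv])
      rw [PySem.Dict.getD_eq_get?_getD, hnone]
      simp [hv]
    · have hmem : (k, v) ∈ I.items := PySem.Dict.mem_items_of_get?_eq_some I hg
      have hmemf : (k, v) ∈ I.items.filter (fun p => p.2 != pvNA) := by
        exact List.mem_filter.mpr ⟨hmem, by simpa using hv⟩
      have : (PySem.Dict.ofList (I.items.filter (fun p => p.2 != pvNA))).get? k = some v := by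
        apply PySem.Dict.get?_of_mem_items
        · rw [hitems]; exact hmemf
        · simpa [PySem.Dict.keys, hitems] using hfkeys
      rw [PySem.Dict.getD_eq_get?_getD, this]
      simp [hv]
  | none =>
    have hkI : k ∉ I.keys := by
      rw [← PySem.Dict.get?_eq_none_iff_not_mem_keys]; exact hg
    have hnone : (PySem.Dict.ofList (I.items.filter (fun p => p.2 != pvNA))).get? k = none := by
      rw [PySem.Dict.get?_eq_none_iff_not_mem_keys]
      intro hmem
      simp only [PySem.Dict.keys, hitems, List.mem_map] at hmem
      obtain ⟨p, hp, hpk⟩ := hmem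
      exact hkI (by
        rw [← hpk]
        exact PySem.Dict.mem_keys_of_mem_items I ((List.mem_filter.mp hp).1))
    rw [PySem.Dict.getD_eq_get?_getD, hnone]
    rfl

theorem merge_attrs_spec : Claim_equal_merge_attrs := by
  intro existing incoming _
  unfold Spec_merge_attrs merge_attrs merge_attrs_alt
  have hE : (PySem.Dict.ofList existing).keys.Nodup := PySem.Dict.nodup_keys_ofList existing
  have hI : (PySem.Dict.ofList incoming).keys.Nodup := PySem.Dict.nodup_keys_ofList incoming
  set E := PySem.Dict.ofList existing with hEdef
  set I := PySem.Dict.ofList incoming with hIdef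
  have hImk : PySem.Dict.mk I.items = I := rfl
  rw [pv_fold_eq I.items E (by simpa [PySem.Dict.keys] using hI) hE, hImk]
  -- rewrite B's side
  have hhead : E.items.map (fun p => (p.1, (PySem.Dict.ofList (I.items.filter (fun p => p.2 != pvNA))).getD p.1 p.2))
      = E.keys.map (fun k => (k, pvPick E I k)) := by
    rw [PySem.Dict.items_eq_map_keys E hE pvNA, List.map_map]
    apply List.map_congr_left
    intro k hk
    simp only [Function.comp]
    rw [pv_override_getD I hI]
    unfold pvPick
    cases I.get? k <;> rfl
  have htail : I.items.filter (fun p => !(E.contains p.1))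
      = (I.keys.filter (fun k => !(E.contains k))).map (fun k => (k, pvPick E I k)) := by
    rw [PySem.Dict.items_eq_map_keys I hI pvNA, List.filter_map]
    have hpred : (List.filter ((fun p => !E.contains p.1) ∘ (fun k => ((k, I.getD k pvNA) : String × String))) I.keys)
        = I.keys.filter (fun k => !(E.contains k)) := by
      apply List.filter_congr; intro j _; rfl
    rw [hpred]
    apply List.map_congr_left
    intro k hk
    simp only [List.mem_filter] at hk
    obtain ⟨hkI, hkE⟩ := hk
    have hkE' : E.contains k = false := by simpa using hkE
    have hgI : I.get? k = some (I.getD k pvNA) := by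
      cases hg : I.get? k with
      | none =>
        rw [PySem.Dict.get?_eq_none_iff_not_mem_keys] at hg
        exact absurd hkI hg
      | some v => rw [PySem.Dict.getD_of_get?_eq_some I pvNA hg]
    unfold pvPick
    rw [hgI]
    by_cases hv : I.getD k pvNA = pvNA
    · simp [hv, PySem.Dict.getD_of_not_contains E pvNA hkE']
    · simp [hv]
  show List.map (fun k => (k, pvPick E I k)) (E.keys ++ (I.items.map Prod.fst).filter (fun k => !(E.contains k)))
    = (PySem.Dict.ofList ((E.items.map (fun p => (p.1, (PySem.Dict.ofList (I.items.filter (fun p => p.2 != pvNA))).getD p.1 p.2))) ++ (I.items.filter (fun p => !(E.contains p.1))))).items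
  rw [hhead, htail, ← List.map_append]
  have hnd : (((E.keys ++ I.keys.filter (fun k => !(E.contains k))).map (fun k => ((k, pvPick E I k) : String × String))).map Prod.fst).Nodup := by
    rw [List.map_map]
    have heq : ((E.keys ++ I.keys.filter (fun k => !(E.contains k))).map ((Prod.fst) ∘ (fun k => ((k, pvPick E I k) : String × String))))
        = E.keys ++ I.keys.filter (fun k => !(E.contains k)) := by
      simp [Function.comp_def]
    rw [heq]
    apply List.Nodup.append hE ((List.filter_sublist).nodup hI)
    intro a haE haF
    have h2 := (List.mem_filter.mp haF).2
    simp only [Bool.not_eq_true'] at h2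
    rw [← PySem.Dict.contains_iff_mem_keys] at haE
    simp [haE] at h2
  rw [pv_items_ofList _ hnd]
  rfl
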